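-- pv_equiv track=rewrite | github.com/dmi3eva/shishipun | shishiweb/chat/problem_solving.py | read_param_from_task
-- ===== SOURCE A (Python) =====
-- def read_param_from_task(task):
--     words = task.split()
--     parameters = []
--     task = ''
--     index = len(words)
--     for i in range(len(words)):
--         if words[i] == '#':
--             index = i
--         if i < index:
--             task += str(words[i]) + ' '
--         elif i > index:
--             parameters.append(words[i])
--     return task, parameters
-- ===== SOURCE B (Python) =====
-- def read_param_from_task(task):
--     words = task.split()
--     idx = words.index('#') if '#' in words else len(words)
--     head = words[:idx]
--     task = ' '.join(head) + ' ' if head else ''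
--     parameters = [w for w in words[idx + 1:] if w != '#']
--     return task, parameters
-- ===== Notes on version B (the rewrite author's own statement) =====
-- stated objective: simpler
-- what changed: B locates the first '#' once and partitions by slicing (join the head, filter the tail), instead of simulating the evolving-index comparison word by word.
import Mathlib
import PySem

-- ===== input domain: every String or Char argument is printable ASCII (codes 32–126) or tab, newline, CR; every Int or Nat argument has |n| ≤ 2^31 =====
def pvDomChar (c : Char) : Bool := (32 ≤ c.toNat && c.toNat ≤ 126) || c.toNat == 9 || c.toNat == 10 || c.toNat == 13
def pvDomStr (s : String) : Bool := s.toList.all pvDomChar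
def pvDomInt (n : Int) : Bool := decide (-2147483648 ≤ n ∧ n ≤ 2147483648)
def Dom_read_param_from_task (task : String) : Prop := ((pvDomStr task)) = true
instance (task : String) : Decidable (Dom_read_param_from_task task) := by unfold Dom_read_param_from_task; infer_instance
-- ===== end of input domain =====

-- B locates the first '#' once and partitions by slicing (join the head, filter the tail)
-- instead of simulating A's evolving-index comparison word by word; objective: simpler.


-- ===== PORT A =====
-- the loop body of A: update index if the word is '#', then compare i with index
def pvStepA (s : String × List String × Int) (i : Int) (w : String) : String × List String × Int :=
  let index := if w = "#" then i else s.2.2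
  if i < index then (s.1 ++ w ++ " ", s.2.1, index)
  else if index < i then (s.1, s.2.1 ++ [w], index)
  else (s.1, s.2.1, index)

def read_param_from_task (task : String) : String × List String :=
  let words := PySem.Str.split₀ task
  let st := (PySem.List.pyRange 0 (PySem.List.len words) 1).foldl
    (fun s i => pvStepA s i (PySem.List.pyGetD words i ""))
    ("", [], (words.length : Int))
  (st.1, st.2.1)

-- ===== PORT B =====
def read_param_from_task_alt (task : String) : String × List String :=
  let words := PySem.Str.split₀ task
  let idx : Int := match PySem.List.index? words "#" with
    | some k => (k : Int)
    | none => (words.length : Int)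
  let head := PySem.List.slice words none (some idx)
  let t := if head ≠ [] then PySem.Str.join " " head ++ " " else ""
  let parameters := (PySem.List.slice words (some (idx + 1)) none).filter (fun w => w != "#")
  (t, parameters)

-- ===== PRECONDITION & SPEC =====
def Spec_read_param_from_task (task : String) (out : String × List String) : Prop := out = read_param_from_task_alt task
instance (task : String) (out : String × List String) : Decidable (Spec_read_param_from_task task out) := by unfold Spec_read_param_from_task; infer_instance

-- ===== CLAIM (what is proved, stated in full; the proofs are below) =====
def Claim_equal_read_param_from_task : Prop := ∀ (task : String), Dom_read_param_from_task task → Spec_read_param_from_task task (read_param_from_task task)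

-- ===== LEMMAS AND PROOFS =====

-- A's prefix accumulation: each word followed by one space
def pvJoinSp : List String → String
  | [] => ""
  | w :: ws => w ++ " " ++ pvJoinSp ws

theorem pvJoinSp_toList (ws : List String) (h : ws ≠ []) :
    (pvJoinSp ws).toList = PySem.Chars.join [' '] (ws.map String.toList) ++ [' '] := by
  induction ws with
  | nil => exact absurd rfl h
  | cons w ws ih =>
    cases ws with
    | nil => simp [pvJoinSp, PySem.Chars.join_singleton]
    | cons v vs =>
      rw [pvJoinSp, List.map_cons, List.map_cons, PySem.Chars.join_cons_cons]
      simp only [String.toList_append, ih (by simp)]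
      simp

theorem pvJoinSp_eq_join (ws : List String) :
    pvJoinSp ws = if ws ≠ [] then PySem.Str.join " " ws ++ " " else "" := by
  by_cases h : ws = []
  · simp [h, pvJoinSp]
  · rw [if_pos h]
    apply String.toList_inj.mp
    rw [pvJoinSp_toList ws h]
    simp [PySem.Str.toList_join]

-- phase 1: before any '#' has been seen (index = N, every position stays < N)
theorem pvPhase1 (ws : List String) (s N : Int) (t0 : String) (ps0 : List String)
    (hns : ∀ w ∈ ws, w ≠ "#") (hle : s + ws.length ≤ N) :
    (PySem.List.enumerate ws s).foldl (fun st p => pvStepA st p.1 p.2) (t0, ps0, N)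
      = (t0 ++ pvJoinSp ws, ps0, N) := by
  induction ws generalizing s t0 with
  | nil => simp [pvJoinSp]
  | cons w ws ih =>
    rw [PySem.List.enumerate_cons, List.foldl_cons]
    have hw : w ≠ "#" := hns w (by simp)
    have hlt : s < N := by
      have := ws.length.cast_nonneg (α := Int); simp at hle; omega
    have hstep : pvStepA (t0, ps0, N) s w = (t0 ++ w ++ " ", ps0, N) := by
      simp [pvStepA, hw, hlt]
    rw [hstep, ih (s + 1) (t0 ++ w ++ " ") (fun v hv => hns v (List.mem_cons_of_mem _ hv))
        (by simp at hle ⊢; omega)]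
    simp [pvJoinSp, String.append_assoc]

-- phase 2: after the first '#' (index stays strictly below the running position)
theorem pvPhase2 (ws : List String) (s idx : Int) (t0 : String) (ps0 : List String)
    (hlt : idx < s) :
    (PySem.List.enumerate ws s).foldl (fun st p => pvStepA st p.1 p.2) (t0, ps0, idx)
      = (t0, ps0 ++ ws.filter (fun w => w != "#"),
         ((PySem.List.enumerate ws s).foldl (fun st p => pvStepA st p.1 p.2) (t0, ps0, idx)).2.2) := by
  induction ws generalizing s idx ps0 with
  | nil => simp
  | cons w ws ih =>
    rw [PySem.List.enumerate_cons, List.foldl_cons]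
    by_cases hw : w = "#"
    · have hstep : pvStepA (t0, ps0, idx) s w = (t0, ps0, s) := by
        simp [pvStepA, hw]
      rw [hstep, ih (s + 1) s ps0 (by omega)]
      simp [hw]
    · have hstep : pvStepA (t0, ps0, idx) s w = (t0, ps0 ++ [w], idx) := by
        simp [pvStepA, hw, hlt, not_lt.mpr (le_of_lt hlt)]
      rw [hstep, ih (s + 1) idx (ps0 ++ [w]) (by omega)]
      simp [hw]

-- the list-level core fact: A's fold over any word list equals B's slice-based partition
theorem pvCore (words : List String) :
    (let st := (PySem.List.pyRange 0 (PySem.List.len words) 1).foldl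
        (fun s i => pvStepA s i (PySem.List.pyGetD words i ""))
        ("", [], (words.length : Int))
     ((st.1, st.2.1) : String × List String))
    = (let idx : Int := match PySem.List.index? words "#" with
        | some k => (k : Int)
        | none => (words.length : Int)
       let head := PySem.List.slice words none (some idx)
       let t := if head ≠ [] then PySem.Str.join " " head ++ " " else ""
       let parameters := (PySem.List.slice words (some (idx + 1)) none).filter (fun w => w != "#")
       (t, parameters)) := by
  have hfold : (PySem.List.pyRange 0 (PySem.List.len words) 1).foldl
      (fun s i => pvStepA s i (PySem.List.pyGetD words i ""))
      ("", [], (words.length : Int))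
      = (PySem.List.enumerate words).foldl (fun st p => pvStepA st p.1 p.2)
          ("", [], (words.length : Int)) := by
    rw [PySem.List.enumerate_eq_map_pyRange words "", List.foldl_map]
  simp only [hfold]
  cases hidx : PySem.List.index? words "#" with
  | none =>
    have hmem : "#" ∉ words := (PySem.List.index?_eq_none_iff words "#").mp hidx
    rw [pvPhase1 words 0 (words.length : Int) "" []
        (fun w hw => fun h => hmem (h ▸ hw)) (by simp)]
    simp only []
    rw [PySem.List.slice_to words (by positivity),
        PySem.List.slice_from words (by positivity)]
    simp [pvJoinSp_eq_join, List.drop_eq_nil_of_le]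
  | some k =>
    obtain ⟨pre, suf, hsplit, hlen, hnot⟩ := (PySem.List.index?_eq_some_iff words "#" k).mp hidx
    subst hsplit
    rw [PySem.List.enumerate_append]
    rw [List.foldl_append]
    rw [pvPhase1 pre 0 ((pre ++ "#" :: suf).length : Int) "" []
        (fun w hw => fun h => hnot (h ▸ hw)) (by simp; omega)]
    rw [PySem.List.enumerate_cons, List.foldl_cons]
    have hstep : pvStepA ("" ++ pvJoinSp pre, [], ((pre ++ "#" :: suf).length : Int))
        (0 + (pre.length : Int)) "#" = ("" ++ pvJoinSp pre, [], (pre.length : Int)) := by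
      simp [pvStepA]
    rw [hstep]
    rw [pvPhase2 suf (0 + (pre.length : Int) + 1) (pre.length : Int) _ _ (by omega)]
    simp only []
    rw [PySem.List.slice_to _ (by positivity)]
    have h1 : ((k : Int)).toNat = k := by omega
    have h2 : ((k : Int) + 1) = ((k + 1 : Nat) : Int) := by push_cast; ring
    rw [h2, PySem.List.slice_from _ (by positivity)]
    have htake : (pre ++ "#" :: suf).take ((k : Int)).toNat = pre := by
      rw [h1, ← hlen, List.take_left]
    have hdrop : (pre ++ "#" :: suf).drop (((k + 1 : Nat) : Int)).toNat = suf := by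
      have : pre ++ "#" :: suf = (pre ++ ["#"]) ++ suf := by simp
      rw [this, Int.toNat_natCast]
      have hl : (pre ++ ["#"]).length = k + 1 := by simp [hlen]
      rw [← hl, List.drop_left]
    rw [htake, hdrop]
    simp [pvJoinSp_eq_join]

-- ===== VERDICT (by name: the statement is the Claim_ definition above) =====
theorem read_param_from_task_spec : Claim_equal_read_param_from_task := by
  intro task _
  unfold Spec_read_param_from_task read_param_from_task read_param_from_task_alt
  exact pvCore (PySem.Str.split₀ task)
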